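-- pv_equiv track=rewrite | github.com/fabriceHategekimana/projet | activite/histoire/outil/labo/compile.py | setORAND
-- ===== SOURCE A (Python) =====
-- def match(l1,l2):
--     res= False
--     for l in l1:
--         if l in l2:
--             res= True
--     return res
--
-- def setAND(exp, varList):
--     for i in range(len(varList)-1):
--         if match(varList[i],varList[i+1]):
--             exp= exp.replace("AND","NATURAL JOIN",1)
--         else:
--             exp= exp.replace("AND","CROSS JOIN",1)
--     return exp
--
-- def setORAND(exp, varList):
--     final= []
--     tabOR= exp.split(" OR ")
--     index= 0
--     for t in tabOR:
--         num= len(t.split(" AND "))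
--         final.append(setAND(t, varList[index:index+num]))
--         index += num
--     return " UNION ".join(final)
-- ===== SOURCE B (Python) =====
-- def setORAND(exp, varList):
--     NJ, CJ = "NATURAL JOIN", "CROSS JOIN"
--     final = []
--     index = 0
--     for t in exp.split(" OR "):
--         num = len(t.split(" AND "))
--         chunk = varList[index:index + num]
--         pieces = []
--         pos = 0
--         for a, b in zip(chunk, chunk[1:]):
--             k = t.find("AND", pos)
--             if k < 0:
--                 break
--             pieces.append(t[pos:k])
--             pieces.append(NJ if not set(a).isdisjoint(b) else CJ)
--             pos = k + 3
--         pieces.append(t[pos:])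
--         final.append("".join(pieces))
--         index += num
--     return " UNION ".join(final)
-- ===== Notes on version B (the rewrite author's own statement) =====
-- stated objective: alternative
-- what changed: B replaces A's nested-loop match() with a set-disjointness test and A's repeated exp.replace('AND',...,1) calls (each rescanning the evolving string from the start) with a single left-to-right scan using str.find from the previous position, assembling the result in one pass over the original term.
import Mathlib
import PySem

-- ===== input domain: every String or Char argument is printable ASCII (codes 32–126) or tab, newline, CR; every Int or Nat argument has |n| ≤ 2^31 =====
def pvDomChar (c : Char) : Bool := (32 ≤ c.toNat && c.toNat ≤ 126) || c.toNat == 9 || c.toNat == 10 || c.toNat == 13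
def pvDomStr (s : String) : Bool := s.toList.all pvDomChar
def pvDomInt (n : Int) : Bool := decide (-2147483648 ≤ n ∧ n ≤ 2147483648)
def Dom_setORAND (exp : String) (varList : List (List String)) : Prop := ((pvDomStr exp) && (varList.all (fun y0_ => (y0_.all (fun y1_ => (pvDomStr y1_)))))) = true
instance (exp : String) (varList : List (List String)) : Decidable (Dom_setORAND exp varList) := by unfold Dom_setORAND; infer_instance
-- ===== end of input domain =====

-- B replaces A's repeated scan-from-the-start `str.replace(...,1)` calls by one left-to-right
-- positional scan of each OR-term and A's nested-loop `match` by a set-disjointness test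
-- (objective: alternative — a genuinely different one-pass algorithm of similar measured cost).

-- ===== PORT A =====
def pvAND : List Char := ['A', 'N', 'D']

-- Python `l in l2` (list membership)
def matchA (l1 l2 : List String) : Bool :=
  l1.foldl (fun res l => if l2.contains l then true else res) false

-- s.replace(old, new, 1) for nonempty old: exact — Python replaces the first occurrence
-- (located at s.find(old)); no occurrence means no change.
def pyReplace1 (s old new : List Char) : List Char :=
  let j := PySem.Chars.find s old
  if j = -1 then s else s.take j.toNat ++ new ++ s.drop (j.toNat + old.length)

-- setAND: for i in range(len(varList)-1): replace first "AND" by NATURAL/CROSS JOIN.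
-- varList[i] is ported as pyGetD with default [] — every index range() produces is in range.
def setANDA (exp : List Char) (varList : List (List String)) : List Char :=
  (PySem.List.pyRange 0 ((varList.length : Int) - 1)).foldl
    (fun e i =>
      if matchA (PySem.List.pyGetD varList i []) (PySem.List.pyGetD varList (i + 1) []) then
        pyReplace1 e pvAND "NATURAL JOIN".toList
      else
        pyReplace1 e pvAND "CROSS JOIN".toList) exp

def setORAND (exp : String) (varList : List (List String)) : String :=
  let tabOR := PySem.Chars.splitOn exp.toList " OR ".toList
  let st := tabOR.foldl
    (fun (st : List (List Char) × Int) t =>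
      let num : Int := (PySem.Chars.splitOn t " AND ".toList).length
      (st.1 ++ [setANDA t (PySem.List.slice varList (some st.2) (some (st.2 + num)))],
       st.2 + num)) ([], 0)
  String.ofList (PySem.Chars.join " UNION ".toList st.1)

-- ===== PORT B =====
def matchB (l1 l2 : List String) : Bool :=
  !(PySem.Set.isdisjoint (PySem.Set.ofList l1) (PySem.Set.ofList l2))

-- the single forward scan: for each join word find the next "AND" from pos, emit t[pos:k],
-- the join word, and continue at k+3; on find < 0 (or when the words run out) emit t[pos:].
def scanB (t : List Char) (pos : Nat) (ws : List (List Char)) : List Char :=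
  match ws with
  | [] => PySem.Chars.slice t (some (pos : Int)) none
  | w :: ws' =>
      if PySem.Chars.findFrom t pvAND (pos : Int) < 0 then
        PySem.Chars.slice t (some (pos : Int)) none
      else
        PySem.Chars.slice t (some (pos : Int)) (some (PySem.Chars.findFrom t pvAND (pos : Int)))
          ++ w ++ scanB t ((PySem.Chars.findFrom t pvAND (pos : Int)).toNat + 3) ws'

def innerB (t : List Char) (chunk : List (List String)) : List Char :=
  scanB t 0 ((chunk.zip chunk.tail).map (fun p =>
    if matchB p.1 p.2 then "NATURAL JOIN".toList else "CROSS JOIN".toList))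

def setORAND_alt (exp : String) (varList : List (List String)) : String :=
  let tabOR := PySem.Chars.splitOn exp.toList " OR ".toList
  let st := tabOR.foldl
    (fun (st : List (List Char) × Int) t =>
      let num : Int := (PySem.Chars.splitOn t " AND ".toList).length
      (st.1 ++ [innerB t (PySem.List.slice varList (some st.2) (some (st.2 + num)))],
       st.2 + num)) ([], 0)
  String.ofList (PySem.Chars.join " UNION ".toList st.1)

-- ===== PRECONDITION & SPEC =====
def Spec_setORAND (exp : String) (varList : List (List String)) (out : String) : Prop := out = setORAND_alt exp varList
instance (exp : String) (varList : List (List String)) (out : String) : Decidable (Spec_setORAND exp varList out) := by unfold Spec_setORAND; infer_instance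

-- ===== CLAIM (what is proved, stated in full; the proofs are below) =====
def Claim_equal_setORAND : Prop := ∀ (exp : String) (varList : List (List String)), Dom_setORAND exp varList → Spec_setORAND exp varList (setORAND exp varList)

-- ===== LEMMAS AND PROOFS =====

-- an occurrence of "AND" starting at index i
def occAND (s : List Char) (i : Nat) : Prop :=
  s[i]? = some 'A' ∧ s[i + 1]? = some 'N' ∧ s[i + 2]? = some 'D'

def noOcc (s : List Char) : Prop := ∀ i, ¬ occAND s i

-- safe left block: empty or ends in "IN" (so no "AND" can straddle its right edge)
def SafeL (s : List Char) : Prop := s = [] ∨ ∃ s', s = s' ++ ['I', 'N']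

-- safe right block: does not start with "D" or "ND"
def SafeR (s : List Char) : Prop :=
  s[0]? ≠ some 'D' ∧ ¬ (s[0]? = some 'N' ∧ s[1]? = some 'D')

lemma occ_iff (s : List Char) (i : Nat) : pvAND <+: s.drop i ↔ occAND s i := by
  
  simp only [List.prefix_iff_getElem?, occAND]
  constructor
  · intro h
    have h0 := h 0 (by simp [pvAND])
    have h1 := h 1 (by simp [pvAND])
    have h2 := h 2 (by simp [pvAND])
    simp only [List.getElem?_drop, pvAND] at h0 h1 h2
    exact ⟨h0, h1, h2⟩
  · rintro ⟨h0, h1, h2⟩ j hj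
    simp only [pvAND, List.length_cons, List.length_nil] at hj
    interval_cases j <;> simp [pvAND, List.getElem?_drop, h0, h1, h2]

lemma find_neg_iff_noOcc (s : List Char) : PySem.Chars.find s pvAND = -1 ↔ noOcc s := by
  rw [PySem.Chars.find_eq_neg_one_iff]
  unfold noOcc
  constructor
  · intro h i hi
    exact h ((PySem.Chars.isIn_iff_infix _ _).mp
      ((PySem.Chars.exists_prefix_drop_iff_isIn _ _).mp ⟨i, (occ_iff s i).mpr hi⟩))
  · intro h hinf
    obtain ⟨j, hj⟩ := (PySem.Chars.exists_prefix_drop_iff_isIn _ _).mpr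
      ((PySem.Chars.isIn_iff_infix _ _).mpr hinf)
    exact h j ((occ_iff s j).mp hj)

lemma find_eq_of_occ (s : List Char) (k : Nat) (h : occAND s k)
    (hmin : ∀ i < k, ¬ occAND s i) : PySem.Chars.find s pvAND = (k : Int) := by
  have hinf : pvAND <:+: s := (PySem.Chars.isIn_iff_infix _ _).mp
    ((PySem.Chars.exists_prefix_drop_iff_isIn _ _).mp ⟨k, (occ_iff s k).mpr h⟩)
  have h0 : 0 ≤ PySem.Chars.find s pvAND := (PySem.Chars.find_nonneg_iff _ _).mpr hinf
  obtain ⟨hp, hm⟩ := PySem.Chars.find_spec h0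
  have hk1 : ¬ (PySem.Chars.find s pvAND).toNat < k := fun hlt => hmin _ hlt ((occ_iff s _).mp hp)
  have hk2 : ¬ k < (PySem.Chars.find s pvAND).toNat := fun hlt => hm k hlt ((occ_iff s k).mpr h)
  have := Int.toNat_of_nonneg h0
  omega

lemma occ_shift (a b : List Char) (m : Nat) : occAND (a ++ b) (a.length + m) ↔ occAND b m := by
  unfold occAND
  rw [List.getElem?_append_right (by omega), List.getElem?_append_right (by omega),
      List.getElem?_append_right (by omega)]
  have e0 : a.length + m - a.length = m := by omega
  have e1 : a.length + m + 1 - a.length = m + 1 := by omega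
  have e2 : a.length + m + 2 - a.length = m + 2 := by omega
  rw [e0, e1, e2]

lemma straddle (a b : List Char) (i : Nat) (ha : noOcc a) (hi : i < a.length)
    (hsafe : SafeL a ∨ SafeR b) : ¬ occAND (a ++ b) i := by
  rintro ⟨h0, h1, h2⟩
  rw [List.getElem?_append_left hi] at h0
  by_cases hA : i + 2 < a.length
  · rw [List.getElem?_append_left (by omega)] at h1
    rw [List.getElem?_append_left (by omega)] at h2
    exact ha i ⟨h0, h1, h2⟩
  · by_cases hB : i + 1 < a.length
    · -- a.length = i + 2 : "AN" at the end of a, "D" at the head of b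
      rw [List.getElem?_append_left hB] at h1
      rw [List.getElem?_append_right (by omega)] at h2
      have e2 : i + 2 - a.length = 0 := by omega
      rw [e2] at h2
      rcases hsafe with hs | hs
      · rcases hs with rfl | ⟨s', rfl⟩
        · simp at hi
        · have hi' : i = s'.length := by
            simp only [List.length_append, List.length_cons, List.length_nil] at hA hB hi
            omega
          rw [List.getElem?_append_right (by omega), hi'] at h0
          simp at h0
      · exact hs.1 h2
    · -- a.length = i + 1 : "A" at the end of a, "ND" at the head of b
      rw [List.getElem?_append_right (by omega)] at h1
      rw [List.getElem?_append_right (by omega)] at h2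
      have e1 : i + 1 - a.length = 0 := by omega
      have e2 : i + 2 - a.length = 1 := by omega
      rw [e1] at h1; rw [e2] at h2
      rcases hsafe with hs | hs
      · rcases hs with rfl | ⟨s', rfl⟩
        · simp at hi
        · have hi' : i = s'.length + 1 := by
            simp only [List.length_append, List.length_cons, List.length_nil] at hA hB hi
            omega
          rw [List.getElem?_append_right (by omega), hi'] at h0
          simp at h0
      · exact hs.2 ⟨h1, h2⟩

lemma noOcc_append (a b : List Char) (ha : noOcc a) (hb : noOcc b)
    (hsafe : SafeL a ∨ SafeR b) : noOcc (a ++ b) := by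
  intro i hocc
  by_cases hi : i < a.length
  · exact straddle a b i ha hi hsafe hocc
  · have hieq : i = a.length + (i - a.length) := by omega
    rw [hieq] at hocc
    exact hb _ ((occ_shift a b _).mp hocc)

lemma foldl_replace1_id (s : List Char) (ws : List (List Char))
    (h : PySem.Chars.find s pvAND = -1) :
    ws.foldl (fun e w => pyReplace1 e pvAND w) s = s := by
    induction ws with
  | nil => rfl
  | cons w ws ih =>
    have : pyReplace1 s pvAND w = s := by simp [pyReplace1, h]
    simpa [this] using ih

lemma noOcc_take (s : List Char) (j : Nat) (hmin : ∀ i < j, ¬ occAND s i) :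
    noOcc (s.take j) := by
  rintro m ⟨h0, h1, h2⟩
  rw [List.getElem?_take] at h0 h1 h2
  by_cases hm2 : m + 2 < j
  · rw [if_pos (by omega)] at h0
    rw [if_pos (by omega)] at h1
    rw [if_pos hm2] at h2
    exact hmin m (by omega) ⟨h0, h1, h2⟩
  · rw [if_neg hm2] at h2
    simp at h2

lemma main_scan (ws : List (List Char))
    (hw : ∀ w ∈ ws, w = "NATURAL JOIN".toList ∨ w = "CROSS JOIN".toList) :
    ∀ (out t : List Char) (pos : Nat), pos ≤ t.length → noOcc out → SafeL out →
    ws.foldl (fun e w => pyReplace1 e pvAND w) (out ++ t.drop pos) = out ++ scanB t pos ws := by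
  revert hw
  induction ws with
  | nil =>
    intro hw out t pos hpos hno hsafe
    simp only [List.foldl_nil, scanB, PySem.Chars.slice_eq_listSlice]
    rw [PySem.List.slice_from t (Int.natCast_nonneg pos)]
    simp
  | cons w ws ih =>
    intro hw out t pos hpos hno hsafe
    have hw' : ∀ x ∈ ws, x = "NATURAL JOIN".toList ∨ x = "CROSS JOIN".toList :=
      fun x hx => hw x (List.mem_cons_of_mem w hx)
    have hwh : w = "NATURAL JOIN".toList ∨ w = "CROSS JOIN".toList := hw w List.mem_cons_self
    have hf := PySem.Chars.findFrom_natCast t pvAND pos hpos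
    by_cases hj : PySem.Chars.find (t.drop pos) pvAND = -1
    · -- no occurrence left: every later replace is a no-op, B emits the rest and stops
      have hk : PySem.Chars.findFrom t pvAND (↑pos) = -1 := by rw [hf, if_pos hj]
      have hnoS : noOcc (t.drop pos) := (find_neg_iff_noOcc _).mp hj
      have hnoOS : noOcc (out ++ t.drop pos) := noOcc_append _ _ hno hnoS (Or.inl hsafe)
      have hfind : PySem.Chars.find (out ++ t.drop pos) pvAND = -1 :=
        (find_neg_iff_noOcc _).mpr hnoOS
      rw [List.foldl_cons]
      have hid : pyReplace1 (out ++ t.drop pos) pvAND w = out ++ t.drop pos := by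
        simp [pyReplace1, hfind]
      rw [hid, foldl_replace1_id _ _ hfind]
      simp only [scanB, hk]
      rw [if_pos (by norm_num)]
      rw [PySem.Chars.slice_eq_listSlice, PySem.List.slice_from t (Int.natCast_nonneg pos)]
      simp
    · -- an occurrence: A replaces it in place, B emits the prefix and the join word
      have hge : 0 ≤ PySem.Chars.find (t.drop pos) pvAND := by
        have h' := PySem.Chars.neg_one_le_find (t.drop pos) pvAND
        omega
      obtain ⟨jn, hjn⟩ : ∃ n : Nat, PySem.Chars.find (t.drop pos) pvAND = (n : Int) :=
        ⟨_, (Int.toNat_of_nonneg hge).symm⟩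
      have hjt : (PySem.Chars.find (t.drop pos) pvAND).toNat = jn := by
        rw [hjn]; exact Int.toNat_natCast _
      obtain ⟨hp, hm⟩ := PySem.Chars.find_spec hge
      rw [hjt] at hp
      have hocc : occAND (t.drop pos) jn := (occ_iff _ _).mp hp
      have hmin : ∀ i < jn, ¬ occAND (t.drop pos) i := by
        intro i hi hoc
        exact hm i (by omega) ((occ_iff _ _).mpr hoc)
      have hfind2 : PySem.Chars.find (out ++ t.drop pos) pvAND = ((out.length + jn : Nat) : Int) := by
        apply find_eq_of_occ
        · exact (occ_shift _ _ _).mpr hocc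
        · intro i hilt
          by_cases hio : i < out.length
          · exact straddle _ _ i hno hio (Or.inl hsafe)
          · intro hoc
            have hoc' : occAND (t.drop pos) (i - out.length) := by
              apply (occ_shift out (t.drop pos) (i - out.length)).mp
              rw [show out.length + (i - out.length) = i by omega]
              exact hoc
            exact hmin _ (by omega) hoc'
      have hk : PySem.Chars.findFrom t pvAND (↑pos) = ((pos + jn : Nat) : Int) := by
        rw [hf, if_neg hj, hjn]; push_cast; ring
      have hlenS : jn + 2 < (t.drop pos).length := by
        obtain ⟨hlt, -⟩ := List.getElem?_eq_some_iff.mp hocc.2.2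
        omega
      have hpos' : pos + jn + 3 ≤ t.length := by
        have hdl : (t.drop pos).length = t.length - pos := List.length_drop
        omega
      rw [List.foldl_cons]
      have e1 : (out ++ List.drop pos t).take (out.length + jn)
          = out ++ (List.drop pos t).take jn := by
        rw [List.take_append, List.take_of_length_le (by omega)]
        congr 2
        omega
      have e2 : (out ++ List.drop pos t).drop (out.length + jn + 3)
          = (List.drop pos t).drop (jn + 3) := by
        rw [List.drop_append, List.drop_eq_nil_of_le (by omega : out.length ≤ out.length + jn + 3)]
        rw [List.nil_append]
        congr 1
        omega
      have hrep : pyReplace1 (out ++ List.drop pos t) pvAND w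
          = (out ++ (List.drop pos t).take jn ++ w) ++ List.drop (pos + jn + 3) t := by
        unfold pyReplace1
        rw [hfind2]
        rw [if_neg (by omega)]
        rw [Int.toNat_natCast]
        rw [show pvAND.length = 3 from rfl]
        rw [e1, e2]
        rw [List.drop_drop]
        rw [← Nat.add_assoc]
      rw [hrep]
      have hnoTake : noOcc ((t.drop pos).take jn) := noOcc_take _ _ hmin
      have hnoW : noOcc w := by
        rcases hwh with rfl | rfl
        · exact (find_neg_iff_noOcc _).mp (by decide)
        · exact (find_neg_iff_noOcc _).mp (by decide)
      have hSafeRw : SafeR w := by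
        rcases hwh with rfl | rfl <;> exact ⟨by decide, by decide⟩
      have hno' : noOcc (out ++ (t.drop pos).take jn ++ w) :=
        noOcc_append _ _ (noOcc_append _ _ hno hnoTake (Or.inl hsafe)) hnoW (Or.inr hSafeRw)
      have hsafe' : SafeL (out ++ (t.drop pos).take jn ++ w) := by
        rcases hwh with rfl | rfl
        · exact Or.inr ⟨out ++ ((t.drop pos).take jn ++ "NATURAL JO".toList), by
            simp only [List.append_assoc]; rfl⟩
        · exact Or.inr ⟨out ++ ((t.drop pos).take jn ++ "CROSS JO".toList), by
            simp only [List.append_assoc]; rfl⟩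
      rw [ih hw' (out ++ (t.drop pos).take jn ++ w) t (pos + jn + 3) hpos' hno' hsafe']
      conv_rhs => rw [scanB]
      rw [hk]
      rw [if_neg (by omega)]
      rw [Int.toNat_natCast]
      rw [PySem.Chars.slice_eq_listSlice, PySem.List.slice_natCast]
      rw [show pos + jn - pos = jn by omega]
      simp [List.append_assoc]
lemma matchA_eq (l1 l2 : List String) : matchA l1 l2 = matchB l1 l2 := by
  have key : ∀ (l : List String) (b : Bool),
      l.foldl (fun res x => if l2.contains x then true else res) b
        = (b || l.any (fun x => l2.contains x)) := by
    intro l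
    induction l with
    | nil => simp
    | cons x l ih =>
      intro b
      simp only [List.foldl_cons, List.any_cons, ih]
      cases hx : l2.contains x <;> simp
  rw [Bool.eq_iff_iff]
  unfold matchA matchB
  rw [key l1 false]
  simp only [Bool.false_or, List.any_eq_true, Bool.not_eq_true',
    ← Bool.not_eq_true (PySem.Set.isdisjoint _ _)]
  constructor
  · rintro ⟨x, hx, hc⟩ hdis
    exact ((PySem.Set.isdisjoint_iff _ _).mp hdis) x
      ((PySem.Set.mem_ofList _ _).mpr hx)
      ((PySem.Set.mem_ofList _ _).mpr (List.contains_iff_mem.mp hc))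
  · intro hnd
    by_contra hne
    push Not at hne
    apply hnd
    apply (PySem.Set.isdisjoint_iff _ _).mpr
    intro x hx hx2
    exact hne x ((PySem.Set.mem_ofList _ _).mp hx)
      (List.contains_iff_mem.mpr ((PySem.Set.mem_ofList _ _).mp hx2))

lemma ws_eq (chunk : List (List String)) :
    (List.range (chunk.length - 1)).map (fun i =>
      if matchA (chunk.getD i []) (chunk.getD (i + 1) []) then "NATURAL JOIN".toList
      else "CROSS JOIN".toList) =
    (chunk.zip chunk.tail).map (fun p =>
      if matchB p.1 p.2 then "NATURAL JOIN".toList else "CROSS JOIN".toList) := by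
  apply List.ext_getElem
  · simp only [List.length_map, List.length_range, List.length_zip, List.length_tail]
    omega
  · intro i h1 h2
    simp only [List.length_map, List.length_range] at h1
    simp only [List.getElem_map, List.getElem_range, List.getElem_zip, List.getElem_tail]
    rw [List.getD_eq_getElem _ _ (by omega), List.getD_eq_getElem _ _ (by omega), matchA_eq]

lemma inner_eq (t : List Char) (chunk : List (List String)) :
    setANDA t chunk = innerB t chunk := by
  have hw : ∀ w ∈ (chunk.zip chunk.tail).map (fun p =>
      if matchB p.1 p.2 then "NATURAL JOIN".toList else "CROSS JOIN".toList),
      w = "NATURAL JOIN".toList ∨ w = "CROSS JOIN".toList := by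
    intro w hwmem
    obtain ⟨p, -, rfl⟩ := List.mem_map.mp hwmem
    split
    · exact Or.inl rfl
    · exact Or.inr rfl
  have hnoNil : noOcc [] := by rintro i ⟨h0, -⟩; simp at h0
  have hmain := main_scan _ hw [] t 0 (Nat.zero_le _) hnoNil (Or.inl rfl)
  simp only [List.nil_append, List.drop_zero] at hmain
  unfold setANDA innerB
  rcases Nat.eq_zero_or_pos chunk.length with hn | hn
  · have hceq : chunk = [] := List.length_eq_zero_iff.mp hn
    subst hceq
    simp only [List.length_nil, Nat.cast_zero, zero_sub]
    rw [show PySem.List.pyRange 0 (-1) 1 = [] from by decide]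
    rw [List.foldl_nil]
    rw [show (([] : List (List String)).zip ([] : List (List String)).tail) = [] from rfl]
    rw [List.map_nil]
    simp only [scanB, PySem.Chars.slice_eq_listSlice]
    rw [PySem.List.slice_from t (by norm_num)]
    simp
  · have hcast : ((chunk.length : Int) - 1) = ((chunk.length - 1 : Nat) : Int) := by omega
    rw [hcast, PySem.List.pyRange_zero_natCast, List.foldl_map]
    have hbody : (fun (e : List Char) (k : Nat) =>
        if matchA (PySem.List.pyGetD chunk (↑k) []) (PySem.List.pyGetD chunk (↑k + 1) []) then
          pyReplace1 e pvAND "NATURAL JOIN".toList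
        else pyReplace1 e pvAND "CROSS JOIN".toList)
        = (fun (e : List Char) (k : Nat) => pyReplace1 e pvAND
            (if matchA (chunk.getD k []) (chunk.getD (k + 1) []) then "NATURAL JOIN".toList
             else "CROSS JOIN".toList)) := by
      funext e k
      rw [PySem.List.pyGetD_natCast]
      rw [show ((k : Int) + 1) = ((k + 1 : Nat) : Int) by push_cast; ring]
      rw [PySem.List.pyGetD_natCast]
      split <;> rfl
    rw [hbody]
    rw [← List.foldl_map (f := fun k =>
        if matchA (chunk.getD k []) (chunk.getD (k + 1) []) then "NATURAL JOIN".toList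
        else "CROSS JOIN".toList) (g := fun e w => pyReplace1 e pvAND w)]
    rw [ws_eq]
    exact hmain
-- ===== VERDICT (by name: the statement is the Claim_ definition above) =====
theorem setORAND_spec : Claim_equal_setORAND := by
  intro exp varList _
  unfold Spec_setORAND setORAND setORAND_alt
  have h : (fun (st : List (List Char) × Int) t =>
      let num : Int := (PySem.Chars.splitOn t " AND ".toList).length
      (st.1 ++ [setANDA t (PySem.List.slice varList (some st.2) (some (st.2 + num)))],
       st.2 + num)) =
      (fun (st : List (List Char) × Int) t =>
      let num : Int := (PySem.Chars.splitOn t " AND ".toList).length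
      (st.1 ++ [innerB t (PySem.List.slice varList (some st.2) (some (st.2 + num)))],
       st.2 + num)) := by
    funext st t
    simp only [inner_eq]
  rw [h]
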